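-- pv_equiv track=rewrite | github.com/chulbioinfo/ConVarFinder | bin/ConVarFinder_final.py | reordering_targetID_list
-- ===== SOURCE A (Python) =====
-- def reordering_targetID_list(terNode_list, targetID_list, MonophyleticPair_list):
--   tmp_targetID_list = []
--   mono_list = []
--   poly_list = []
--   for targetID in terNode_list:
--     if targetID in targetID_list:
--       if targetID in MonophyleticPair_list:
--         mono_list.append(targetID)
--       else:
--         poly_list.append(targetID)
--   for targetID in mono_list:
--     tmp_targetID_list.append(targetID)
--   for targetID in poly_list:
--     tmp_targetID_list.append(targetID)
--   return(tmp_targetID_list)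
-- ===== SOURCE B (Python) =====
-- def reordering_targetID_list(terNode_list, targetID_list, MonophyleticPair_list):
--     filtered = [t for t in terNode_list if t in targetID_list]
--     return sorted(filtered, key=lambda t: 0 if t in MonophyleticPair_list else 1)
-- ===== Notes on version B (the rewrite author's own statement) =====
-- stated objective: idiomatic
-- what changed: Replaces the two-bucket partition with two append loops by a single filter comprehension followed by a stable sort on a 0/1 monophyletic key, whose stability reproduces the mono-then-poly order.
import Mathlib
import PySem

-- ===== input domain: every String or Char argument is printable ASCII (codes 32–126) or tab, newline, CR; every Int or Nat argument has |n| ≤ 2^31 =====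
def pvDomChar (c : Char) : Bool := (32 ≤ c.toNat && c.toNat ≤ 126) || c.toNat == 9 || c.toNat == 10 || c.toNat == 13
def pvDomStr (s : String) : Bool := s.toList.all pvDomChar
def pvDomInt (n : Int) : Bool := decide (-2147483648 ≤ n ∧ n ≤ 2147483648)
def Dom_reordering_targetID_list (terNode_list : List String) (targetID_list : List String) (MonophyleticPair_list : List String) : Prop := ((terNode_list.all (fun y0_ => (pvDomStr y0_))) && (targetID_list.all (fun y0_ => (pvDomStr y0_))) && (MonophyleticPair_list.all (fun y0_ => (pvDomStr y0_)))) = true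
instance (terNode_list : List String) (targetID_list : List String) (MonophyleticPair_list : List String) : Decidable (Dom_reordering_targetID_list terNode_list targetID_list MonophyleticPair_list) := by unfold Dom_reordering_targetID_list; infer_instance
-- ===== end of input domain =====

-- B replaces A's two-bucket partition + append loops by filter-then-stable-sort on a 0/1 key (idiomatic; same behaviour).


-- ===== PORT A =====
def reordering_targetID_list (terNode_list : List String) (targetID_list : List String) (MonophyleticPair_list : List String) : List String :=
  let mp : List String × List String :=
    terNode_list.foldl (fun (st : List String × List String) targetID =>
      if targetID_list.contains targetID then
        if MonophyleticPair_list.contains targetID then (st.1 ++ [targetID], st.2)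
        else (st.1, st.2 ++ [targetID])
      else st) ([], [])
  let tmp1 : List String := mp.1.foldl (fun acc targetID => acc ++ [targetID]) []
  let tmp2 : List String := mp.2.foldl (fun acc targetID => acc ++ [targetID]) tmp1
  tmp2

-- ===== PORT B =====
def reordering_targetID_list_alt (terNode_list : List String) (targetID_list : List String) (MonophyleticPair_list : List String) : List String :=
  let filtered := terNode_list.filter (fun t => targetID_list.contains t)
  PySem.List.sorted filtered (fun t => if MonophyleticPair_list.contains t then (0 : Int) else 1)

-- ===== PRECONDITION & SPEC =====
def Spec_reordering_targetID_list (terNode_list : List String) (targetID_list : List String) (MonophyleticPair_list : List String) (out : List String) : Prop := out = reordering_targetID_list_alt terNode_list targetID_list MonophyleticPair_list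
instance (terNode_list : List String) (targetID_list : List String) (MonophyleticPair_list : List String) (out : List String) : Decidable (Spec_reordering_targetID_list terNode_list targetID_list MonophyleticPair_list out) := by unfold Spec_reordering_targetID_list; infer_instance

-- ===== CLAIM (what is proved, stated in full; the proofs are below) =====
def Claim_equal_reordering_targetID_list : Prop := ∀ (terNode_list : List String) (targetID_list : List String) (MonophyleticPair_list : List String), Dom_reordering_targetID_list terNode_list targetID_list MonophyleticPair_list → Spec_reordering_targetID_list terNode_list targetID_list MonophyleticPair_list (reordering_targetID_list terNode_list targetID_list MonophyleticPair_list)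

-- ===== LEMMAS AND PROOFS =====

-- A's partition loop accumulates the two key-filters of the prefix.
theorem partition_foldl (tgt mono : List String) (xs : List String) (m p : List String) :
    xs.foldl (fun (st : List String × List String) targetID =>
      if tgt.contains targetID then
        if mono.contains targetID then (st.1 ++ [targetID], st.2)
        else (st.1, st.2 ++ [targetID])
      else st) (m, p)
    = (m ++ xs.filter (fun t => tgt.contains t && mono.contains t),
       p ++ xs.filter (fun t => tgt.contains t && !mono.contains t)) := by
  induction xs generalizing m p with
  | nil => simp
  | cons x xs ih =>
    rw [List.foldl_cons]
    by_cases h1 : tgt.contains x = true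
    · by_cases h2 : mono.contains x = true
      · rw [if_pos h1, if_pos h2, ih]
        simp_all
      · rw [if_pos h1, if_neg h2, ih]
        simp_all
    · rw [if_neg h1, ih]
      simp_all

-- append-one-by-one foldl is list append
theorem foldl_append_one (xs acc : List String) :
    xs.foldl (fun acc t => acc ++ [t]) acc = acc ++ xs := by
  induction xs generalizing acc with
  | nil => simp
  | cons x xs ih => simp [ih]

-- insertBy skips a block of elements it does not go before
theorem insertBy_append_not (before : String → String → Bool) (x : String)
    (as bs : List String) (h : ∀ y ∈ as, before x y = false) :
    PySem.List.insertBy before x (as ++ bs) = as ++ PySem.List.insertBy before x bs := by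
  induction as with
  | nil => simp
  | cons a as ih =>
    have ha : before x a = false := h a (by simp)
    simp [PySem.List.insertBy, ha]
    exact ih (fun y hy => h y (by simp [hy]))

-- insertBy appends at the end when it goes before nothing
theorem insertBy_end (before : String → String → Bool) (x : String)
    (l : List String) (h : ∀ y ∈ l, before x y = false) :
    PySem.List.insertBy before x l = l ++ [x] := by
  induction l with
  | nil => simp [PySem.List.insertBy]
  | cons a l ih =>
    have ha : before x a = false := h a (by simp)
    simp [PySem.List.insertBy, ha]
    exact ih (fun y hy => h y (by simp [hy]))

-- stable sort on a 0/1 key is the two key-filters concatenated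
theorem sorted01 (q : String → Bool) (xs : List String) :
    PySem.List.sorted xs (fun t => if q t then (0 : Int) else 1)
      = xs.filter q ++ xs.filter (fun t => !q t) := by
  rw [PySem.List.sorted_eq_foldl_insertBy]
  suffices h : ∀ (ys as bs : List String), (∀ y ∈ as, q y = true) → (∀ y ∈ bs, q y = false) →
      ys.foldl (fun acc x => PySem.List.insertBy
        (fun a b => decide ((if q a then (0:Int) else 1) < (if q b then (0:Int) else 1))) x acc)
        (as ++ bs)
      = (as ++ ys.filter q) ++ (bs ++ ys.filter (fun t => !q t)) by
    have := h xs [] [] (by simp) (by simp)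
    simpa using this
  intro ys
  induction ys with
  | nil => intro as bs _ _; simp
  | cons x xs ih =>
    intro as bs has hbs
    by_cases hx : q x = true
    · have hstep : PySem.List.insertBy
          (fun a b => decide ((if q a then (0:Int) else 1) < (if q b then (0:Int) else 1))) x (as ++ bs)
          = (as ++ [x]) ++ bs := by
        rw [insertBy_append_not]
        · cases bs with
          | nil => simp [PySem.List.insertBy]
          | cons b bs' =>
            have hb : q b = false := hbs b (by simp)
            simp [PySem.List.insertBy, hx, hb]
        · intro y hy; simp [hx, has y hy]
      have has' : ∀ y ∈ as ++ [x], q y = true := by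
        intro y hy
        rcases List.mem_append.mp hy with h' | h'
        · exact has y h'
        · simp at h'; simpa [h'] using hx
      simp only [List.foldl_cons, hstep, ih (as ++ [x]) bs has' hbs]
      simp [hx]
    · have hx' : q x = false := by simpa using hx
      have hstep : PySem.List.insertBy
          (fun a b => decide ((if q a then (0:Int) else 1) < (if q b then (0:Int) else 1))) x (as ++ bs)
          = as ++ (bs ++ [x]) := by
        rw [← List.append_assoc]
        apply insertBy_end
        intro y hy
        rcases List.mem_append.mp hy with h' | h'
        · simp [hx', has y h']
        · simp [hx', hbs y h']
      have hbs' : ∀ y ∈ bs ++ [x], q y = false := by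
        intro y hy
        rcases List.mem_append.mp hy with h' | h'
        · exact hbs y h'
        · simp at h'; simpa [h'] using hx'
      simp only [List.foldl_cons, hstep, ih as (bs ++ [x]) has hbs']
      simp [hx']

-- ===== VERDICT (by name: the statement is the Claim_ definition above) =====
theorem reordering_targetID_list_spec : Claim_equal_reordering_targetID_list := by
  intro ter tgt mono _
  unfold Spec_reordering_targetID_list reordering_targetID_list reordering_targetID_list_alt
  simp only [partition_foldl tgt mono ter, foldl_append_one, sorted01, List.filter_filter,
    List.nil_append]
  congr 1 <;> apply List.filter_congr <;> intro a _ <;>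
    cases h1 : tgt.contains a <;> cases h2 : mono.contains a <;> simp_all
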